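-- pv_equiv track=rewrite | github.com/pypi-data/pypi-code-4 | abjad/Abjad-2.12.tar.gz/abjad/tools/stringtools/uppercamelcase_to_space_delimited_lowercase.py | uppercamelcase_to_space_delimited_lowercase
-- ===== SOURCE A (Python) =====
-- def uppercamelcase_to_space_delimited_lowercase(string):
--     r'''.. versionadded:: 2.6
--
--     Change uppercamelcase `string` to space-delimited lowercase::
--
--         >>> string = 'KeySignatureMark'
--
--     ::
--
--         >>> stringtools.uppercamelcase_to_space_delimited_lowercase(string)
--         'key signature mark'
--
--     Return string.
--     '''
--
--     words = []
--     current_word = string[0].lower()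
--     for letter in string[1:]:
--         if letter.isupper():
--             words.append(current_word)
--             current_word = letter.lower()
--         else:
--             current_word = current_word + letter
--     words.append(current_word)
--     result = ' '.join(words)
--     return result
-- ===== SOURCE B (Python) =====
-- def uppercamelcase_to_space_delimited_lowercase(string):
--     # Recursive word-at-a-time splitting: measure the next word, slice it off,
--     # recurse on the remainder.  (Raises IndexError on '' just like the original.)
--     body = string[1:]
--     word_len = 0
--     while word_len < len(body) and not body[word_len].isupper():
--         word_len += 1
--     word = string[0].lower() + body[:word_len]
--     if word_len == len(body):
--         return word
--     return word + ' ' + uppercamelcase_to_space_delimited_lowercase(body[word_len:])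
-- ===== Notes on version B (the rewrite author's own statement) =====
-- stated objective: alternative
-- what changed: replaces A's single-pass loop with a running (words, current_word) accumulator by a recursive decomposition: scan the length of the next word, slice it off whole, emit it, and recurse on the rest of the string
import Mathlib
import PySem

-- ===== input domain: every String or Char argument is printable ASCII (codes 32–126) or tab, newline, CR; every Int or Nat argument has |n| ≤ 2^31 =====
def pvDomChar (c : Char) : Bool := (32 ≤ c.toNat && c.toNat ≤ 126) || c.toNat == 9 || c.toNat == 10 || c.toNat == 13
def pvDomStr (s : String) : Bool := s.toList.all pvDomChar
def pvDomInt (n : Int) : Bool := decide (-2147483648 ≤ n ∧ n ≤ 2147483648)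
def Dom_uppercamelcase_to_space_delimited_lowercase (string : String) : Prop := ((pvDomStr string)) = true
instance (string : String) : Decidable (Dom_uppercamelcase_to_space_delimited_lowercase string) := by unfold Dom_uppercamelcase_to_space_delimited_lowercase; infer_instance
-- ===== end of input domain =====

-- B replaces A's running (words, current_word) accumulator loop by a recursive
-- word-at-a-time decomposition (scan next word's length, slice, recurse); same cost, different shape.

-- ===== PORT A =====
-- A's loop over string[1:] with state (words, current_word); words kept as List (List Char).
def uppercamelcase_to_space_delimited_lowercase (string : String) : String :=
  match string.toList with
  | [] => ""   -- Python: string[0] raises IndexError here; excluded by Pre_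
  | c :: rest =>
    let st := rest.foldl
      (fun (st : List (List Char) × List Char) letter =>
        if PySem.Chars.isupper letter then
          (st.1 ++ [st.2], [PySem.Chars.lowerChar letter])
        else
          (st.1, st.2 ++ [letter]))
      (([] : List (List Char)), [PySem.Chars.lowerChar c])
    String.ofList (PySem.Chars.join [' '] (st.1 ++ [st.2]))

-- ===== PORT B =====
-- the while loop of Source B: number of leading non-uppercase characters
def pvScanLen (cs : List Char) : Nat :=
  match cs with
  | [] => 0
  | c :: rest => if PySem.Chars.isupper c then 0 else pvScanLen rest + 1

-- Source B's recursion on a nonempty string, on the char-list side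
def pvAltRec (cs : List Char) : List Char :=
  match cs with
  | [] => []   -- unreachable: always called on a nonempty list
  | c :: body =>
    let k := pvScanLen body
    let word := PySem.Chars.lowerChar c :: body.take k
    if k = body.length then word
    else word ++ ' ' :: pvAltRec (body.drop k)
termination_by cs.length
decreasing_by simp

def uppercamelcase_to_space_delimited_lowercase_alt (string : String) : String :=
  match string.toList with
  | [] => ""   -- Python: string[0] raises IndexError here; excluded by Pre_
  | c :: body => String.ofList (pvAltRec (c :: body))

-- ===== PRECONDITION & SPEC =====
-- Python A raises IndexError on the empty string (string[0]); that is the only exclusion.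
def Pre_uppercamelcase_to_space_delimited_lowercase (string : String) : Prop := string ≠ ""
instance (string : String) : Decidable (Pre_uppercamelcase_to_space_delimited_lowercase string) := by unfold Pre_uppercamelcase_to_space_delimited_lowercase; infer_instance
def pvWitness_uppercamelcase_to_space_delimited_lowercase : String := "KeySignatureMark"

def Spec_uppercamelcase_to_space_delimited_lowercase (string : String) (out : String) : Prop := out = uppercamelcase_to_space_delimited_lowercase_alt string
instance (string : String) (out : String) : Decidable (Spec_uppercamelcase_to_space_delimited_lowercase string out) := by unfold Spec_uppercamelcase_to_space_delimited_lowercase; infer_instance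

-- ===== CLAIM (what is proved, stated in full; the proofs are below) =====
def Claim_equal_uppercamelcase_to_space_delimited_lowercase : Prop := ∀ (string : String), Dom_uppercamelcase_to_space_delimited_lowercase string → Pre_uppercamelcase_to_space_delimited_lowercase string → Spec_uppercamelcase_to_space_delimited_lowercase string (uppercamelcase_to_space_delimited_lowercase string)

-- ===== LEMMAS AND PROOFS =====

-- the words A's state will still produce from current word `cur` and pending input
def pvWords (cur : List Char) (cs : List Char) : List (List Char) :=
  match cs with
  | [] => [cur]
  | c :: rest =>
    if PySem.Chars.isupper c then cur :: pvWords [PySem.Chars.lowerChar c] rest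
    else pvWords (cur ++ [c]) rest

-- A's fold, flattened to its final word list
theorem pvFold_eq_words (rest : List Char) (words : List (List Char)) (cur : List Char) :
    (let st := rest.foldl
      (fun (st : List (List Char) × List Char) letter =>
        if PySem.Chars.isupper letter then
          (st.1 ++ [st.2], [PySem.Chars.lowerChar letter])
        else
          (st.1, st.2 ++ [letter])) (words, cur)
     st.1 ++ [st.2]) = words ++ pvWords cur rest := by
  induction rest generalizing words cur with
  | nil => simp [pvWords]
  | cons c rs ih =>
    by_cases h : PySem.Chars.isupper c = true
    · simp only [List.foldl_cons, pvWords, h, if_true]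
      rw [ih]
      simp
    · simp only [List.foldl_cons, pvWords, h]
      rw [ih]
      simp

-- pvWords split at the next word boundary
theorem pvWords_span (cs : List Char) (cur : List Char) :
    pvWords cur cs = (cur ++ cs.take (pvScanLen cs)) ::
      (match cs.drop (pvScanLen cs) with
       | [] => []
       | u :: suf => pvWords [PySem.Chars.lowerChar u] suf) := by
  induction cs generalizing cur with
  | nil => simp [pvWords, pvScanLen]
  | cons c rs ih =>
    by_cases h : PySem.Chars.isupper c = true
    · simp [pvWords, pvScanLen, h]
    · simp only [pvWords, pvScanLen, h, if_false, Bool.false_eq_true,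
        List.take_succ_cons, List.drop_succ_cons]
      rw [ih]
      simp

-- B's recursion joins exactly A's word list
theorem pvAltRec_eq_join (n : Nat) (body : List Char) (c : Char) (hn : body.length ≤ n) :
    pvAltRec (c :: body) = PySem.Chars.join [' '] (pvWords [PySem.Chars.lowerChar c] body) := by
  induction n generalizing body c with
  | zero =>
    have hb : body = [] := List.length_eq_zero_iff.mp (Nat.le_zero.mp hn)
    subst hb
    simp [pvAltRec.eq_def, pvScanLen, pvWords, PySem.Chars.join_singleton]
  | succ n ih =>
    rw [pvWords_span]
    rw [pvAltRec.eq_def]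
    simp only
    by_cases hk : pvScanLen body = body.length
    · have hdrop : body.drop (pvScanLen body) = [] := by
        rw [hk]; simp
      simp [hk, PySem.Chars.join_singleton]
    · have hlt : pvScanLen body < body.length := by
        have : pvScanLen body ≤ body.length := by
          clear hk hn ih
          induction body with
          | nil => simp [pvScanLen]
          | cons x xs ihx =>
            simp only [pvScanLen, List.length_cons]
            split <;> omega
        omega
      obtain ⟨u, suf, hdrop⟩ : ∃ u suf, body.drop (pvScanLen body) = u :: suf := by
        cases h : body.drop (pvScanLen body) with
        | nil => exfalso; have := List.drop_eq_nil_iff.mp h; omega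
        | cons u suf => exact ⟨u, suf, rfl⟩
      have hsuf : suf.length ≤ n := by
        have := congrArg List.length hdrop
        simp at this
        omega
      obtain ⟨p, ws, hw⟩ : ∃ p ws, pvWords [PySem.Chars.lowerChar u] suf = p :: ws :=
        ⟨_, _, pvWords_span suf [PySem.Chars.lowerChar u]⟩
      have hB := ih suf u hsuf
      rw [hdrop]
      simp only [hk, if_false, hw, PySem.Chars.join_cons_cons]
      rw [hB, hw]
      simp

-- ===== VERDICT (by name: the statement is the Claim_ definition above) =====
theorem uppercamelcase_to_space_delimited_lowercase_spec : Claim_equal_uppercamelcase_to_space_delimited_lowercase := by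
  intro s _ hpre
  unfold Spec_uppercamelcase_to_space_delimited_lowercase
  unfold uppercamelcase_to_space_delimited_lowercase uppercamelcase_to_space_delimited_lowercase_alt
  cases h : s.toList with
  | nil =>
    exact absurd (String.toList_eq_nil_iff.mp h) hpre
  | cons c body =>
    simp only
    rw [pvFold_eq_words body [] [PySem.Chars.lowerChar c]]
    rw [pvAltRec_eq_join body.length body c (le_refl _)]
    simp
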